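-- pv_equiv track=rewrite | github.com/lufe089/material-intro-prog | Ejercicios/0. Ciclos For/Reto 2. 26-03.py | sumaPrimos
-- ===== SOURCE A (Python) =====
-- def identificarUnos(k):
--     numeroS = str(k)
--     resultado = "1" in numeroS  # "1" in "25" = False  -> "1" in "31" = False
--     return resultado
--
-- def sumaPrimos(n):
--     acumuladorPrimos = 0
--     for i in range(2, n+1):
--         validarPrimo = primos(i)
--         if validarPrimo == True:
--             validarUno = identificarUnos(i)
--             if validarUno == True:
--                 acumuladorPrimos += i
--     return acumuladorPrimos
--
-- def primos(numero):
--     contadorDivisores = 0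
--     resultado = False
--     for j in range(1, numero + 1):
--         operacion = numero%j # División Exacta
--         if operacion == 0:
--             contadorDivisores += 1
--     if contadorDivisores == 2:
--         resultado = True
--     return resultado
-- ===== SOURCE B (Python) =====
-- def _is_prime(m):
--     if m < 2:
--         return False
--     d = 2
--     while d * d <= m:
--         if m % d == 0:
--             return False
--         d += 1
--     return True
--
--
-- def _has_one(m):
--     while m > 0:
--         if m % 10 == 1:
--             return True
--         m //= 10
--     return False
--
--
-- def sumaPrimos(n):
--     total = 0
--     for i in range(2, n + 1):
--         if _is_prime(i) and _has_one(i):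
--             total += i
--     return total
-- ===== Notes on version B (the rewrite author's own statement) =====
-- stated objective: faster
-- what changed: A counts ALL divisors of each candidate with a full 1..i scan and tests count==2, and looks for '1' in str(i); B early-exits on the first divisor found, only trying divisors d with d*d <= i, and finds the digit 1 arithmetically by repeated %10 / //10 instead of building a string.
import Mathlib
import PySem

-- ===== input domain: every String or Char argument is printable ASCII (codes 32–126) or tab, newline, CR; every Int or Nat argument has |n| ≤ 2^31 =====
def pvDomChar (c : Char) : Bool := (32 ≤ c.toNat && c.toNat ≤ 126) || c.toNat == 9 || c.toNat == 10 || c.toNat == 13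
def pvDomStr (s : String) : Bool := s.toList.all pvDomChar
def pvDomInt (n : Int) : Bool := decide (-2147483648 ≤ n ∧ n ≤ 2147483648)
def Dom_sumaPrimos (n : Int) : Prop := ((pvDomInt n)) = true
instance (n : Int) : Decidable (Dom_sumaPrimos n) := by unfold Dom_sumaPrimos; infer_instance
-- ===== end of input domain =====

-- B replaces A's full 1..i divisor count and str(i) digit search by an early-exit
-- trial division up to sqrt(i) and an arithmetic %10 digit scan (measured faster, asymptotic).


-- ===== PORT A =====
def identificarUnos (k : Int) : Bool :=
  let numeroS := PySem.Int.toStr k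
  let resultado := PySem.Str.isIn "1" numeroS
  resultado

def primos (numero : Int) : Bool :=
  let contadorDivisores :=
    (PySem.List.pyRange 1 (numero + 1) 1).foldl
      (fun contador j => if PySem.Int.mod numero j == 0 then contador + 1 else contador)
      (0 : Int)
  if contadorDivisores == 2 then true else false

def sumaPrimos (n : Int) : Int :=
  (PySem.List.pyRange 2 (n + 1) 1).foldl
    (fun acumuladorPrimos i =>
      let validarPrimo := primos i
      if validarPrimo == true then
        let validarUno := identificarUnos i
        if validarUno == true then acumuladorPrimos + i else acumuladorPrimos
      else acumuladorPrimos)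
    0

-- ===== PORT B =====
-- `while d*d <= m` loop; the Nat argument is fuel making the loop total (it never
-- runs out on the calls below: the loop stops once d*d > m, and d only grows)
def isPrimeAux (m : Int) : Nat → Int → Bool
  | 0, _ => true
  | fuel + 1, d =>
    if d * d ≤ m then
      if PySem.Int.mod m d == 0 then false
      else isPrimeAux m fuel (d + 1)
    else true

def isPrime (m : Int) : Bool :=
  if m < 2 then false else isPrimeAux m (m + 1).toNat 2

-- `while m > 0` digit loop, with fuel likewise
def hasOneAux : Nat → Int → Bool
  | 0, _ => false
  | fuel + 1, m =>
    if 0 < m then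
      if PySem.Int.mod m 10 == 1 then true
      else hasOneAux fuel (PySem.Int.floordiv m 10)
    else false

def hasOne (m : Int) : Bool := hasOneAux (m.toNat + 1) m

def sumaPrimos_alt (n : Int) : Int :=
  (PySem.List.pyRange 2 (n + 1) 1).foldl
    (fun total i => if isPrime i && hasOne i then total + i else total)
    0

-- ===== PRECONDITION & SPEC =====
def Spec_sumaPrimos (n : Int) (out : Int) : Prop := out = sumaPrimos_alt n
instance (n : Int) (out : Int) : Decidable (Spec_sumaPrimos n out) := by unfold Spec_sumaPrimos; infer_instance

-- ===== CLAIM (what is proved, stated in full; the proofs are below) =====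
def Claim_equal_sumaPrimos : Prop := ∀ (n : Int), Dom_sumaPrimos n → Spec_sumaPrimos n (sumaPrimos n)

-- ===== LEMMAS AND PROOFS =====

theorem pv_sq_le_imp_le {m d : Int} (h : d * d ≤ m) : d ≤ m := by
  nlinarith [mul_self_nonneg (d - 1)]

-- A's divisor count over 1..N, as a Nat countP
theorem pv_count_divisors (N : Nat) (h2 : 2 ≤ N) :
    ((List.range N).countP (fun k => decide ((k + 1) ∣ N)) = 2) ↔ Nat.Prime N := by
  obtain ⟨M, rfl⟩ : ∃ M, N = M + 2 := ⟨N - 2, by omega⟩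
  rw [Nat.prime_def_lt']
  have hsplit : List.range (M + 2) = 0 :: (List.range' 1 M ++ [1 + M]) := by
    rw [List.range_eq_range', List.range'_succ, List.range'_concat]
    norm_num
  rw [hsplit]
  have hdtop : (decide ((1 + M + 1) ∣ (M + 2))) = true := by
    have h : 1 + M + 1 = M + 2 := by omega
    simp [h]
  have hcount : List.countP (fun k => decide ((k + 1) ∣ (M + 2)))
        (0 :: (List.range' 1 M ++ [1 + M]))
      = List.countP (fun k => decide ((k + 1) ∣ (M + 2))) (List.range' 1 M) + 2 := by
    simp [List.countP_append, List.countP_nil, hdtop]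
    try omega
  rw [hcount]
  constructor
  · intro h
    refine ⟨by omega, fun m hm2 hmlt hdvd => ?_⟩
    have hc0 : List.countP (fun k => decide ((k + 1) ∣ (M + 2))) (List.range' 1 M) = 0 := by
      omega
    rw [List.countP_eq_zero] at hc0
    have hmem : m - 1 ∈ List.range' 1 M := by
      rw [List.mem_range']
      exact ⟨m - 2, by omega, by omega⟩
    have := hc0 _ hmem
    simp only [decide_eq_true_eq] at this
    apply this
    have : m - 1 + 1 = m := by omega
    rw [this]
    exact hdvd
  · rintro ⟨-, h⟩
    have hc0 : List.countP (fun k => decide ((k + 1) ∣ (M + 2))) (List.range' 1 M) = 0 := by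
      rw [List.countP_eq_zero]
      intro a ha
      rw [List.mem_range'] at ha
      obtain ⟨i, hiM, rfl⟩ := ha
      simp only [decide_eq_true_eq]
      exact h _ (by omega) (by omega)
    omega

-- A's primality test decides Nat.Prime
theorem pv_primos_eq (N : Nat) (h2 : 2 ≤ N) :
    primos (N : Int) = decide (Nat.Prime N) := by
  unfold primos
  rw [PySem.List.pyRange_one]
  have ht : (((N : Int) + 1 - 1)).toNat = N := by omega
  rw [ht, List.foldl_map, PySem.List.foldl_if_add_one]
  have hc : List.countP (fun k : Nat => PySem.Int.mod (N : Int) (1 + (k : Int)) == 0) (List.range N)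
      = List.countP (fun k => decide ((k + 1) ∣ N)) (List.range N) := by
    apply List.countP_congr
    intro k _
    simp only [beq_iff_eq, decide_eq_true_eq]
    rw [PySem.Int.mod_eq_zero_iff_dvd]
    have hcast : (1 + (k : Int)) = ((k + 1 : Nat) : Int) := by push_cast; ring
    rw [hcast, Int.natCast_dvd_natCast]
  rw [hc]
  by_cases hp : Nat.Prime N
  · have hcnt : List.countP (fun k => decide ((k + 1) ∣ N)) (List.range N) = 2 :=
      (pv_count_divisors N h2).mpr hp
    simp [hcnt, hp]
  · have hcnt : ¬ ((0 : Int) + (List.countP (fun k => decide ((k + 1) ∣ N)) (List.range N) : Int) = 2) := by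
      intro h
      exact hp ((pv_count_divisors N h2).mp (by omega))
    simp [hp]
    omega

-- B's trial-division loop: invariant by induction on the fuel
theorem pv_isPrimeAux_eq (N : Nat) : ∀ (fuel : Nat) (d : Int), 2 ≤ d →
    ((N : Int) + 1 - d).toNat ≤ fuel →
    ((isPrimeAux (N : Int) fuel d = true) ↔
      (∀ e : Int, d ≤ e → e * e ≤ (N : Int) → ¬ (e ∣ (N : Int)))) := by
  intro fuel
  induction fuel with
  | zero =>
    intro d hd hf
    have hdN : (N : Int) + 1 ≤ d := by omega
    simp only [isPrimeAux, true_iff]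
    intro e he hee _
    have h1 : d * d ≤ e * e := mul_le_mul he he (by omega) (by omega)
    nlinarith
  | succ fuel ih =>
    intro d hd hf
    simp only [isPrimeAux]
    by_cases hg : d * d ≤ (N : Int)
    · rw [if_pos hg]
      have hdle : d ≤ (N : Int) := pv_sq_le_imp_le hg
      by_cases hm : (PySem.Int.mod (N : Int) d == 0) = true
      · rw [if_pos hm]
        simp only [Bool.false_eq_true, false_iff, not_forall]
        refine ⟨d, le_rfl, hg, ?_⟩
        simp only [beq_iff_eq] at hm
        simp [(PySem.Int.mod_eq_zero_iff_dvd _ _).mp hm]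
      · rw [if_neg hm]
        rw [ih (d + 1) (by omega) (by omega)]
        constructor
        · intro h e he hee hdvd
          rcases eq_or_lt_of_le he with rfl | hlt
          · apply hm
            simp only [beq_iff_eq]
            exact (PySem.Int.mod_eq_zero_iff_dvd _ _).mpr hdvd
          · exact h e (by omega) hee hdvd
        · intro h e he hee
          exact h e (by omega) hee
    · rw [if_neg hg]
      simp only [true_iff]
      intro e he hee _
      have h1 : d * d ≤ e * e := mul_le_mul he he (by omega) (by omega)
      linarith

-- B's primality test decides Nat.Prime
theorem pv_isPrime_eq (N : Nat) (h2 : 2 ≤ N) :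
    isPrime (N : Int) = decide (Nat.Prime N) := by
  unfold isPrime
  rw [if_neg (by omega : ¬ ((N : Int) < 2))]
  have hiff := pv_isPrimeAux_eq N ((N : Int) + 1).toNat 2 (by norm_num) (by omega)
  have htN : ((N : Int) + 1).toNat = N + 1 := by omega
  rw [htN] at hiff
  rw [htN]
  have hprime : Nat.Prime N ↔ (∀ e : Int, 2 ≤ e → e * e ≤ (N : Int) → ¬ e ∣ (N : Int)) := by
    rw [Nat.prime_def_le_sqrt]
    constructor
    · rintro ⟨-, h⟩ e he hee hdvd
      lift e to Nat using (by omega : (0 : Int) ≤ e) with m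
      have hm2 : 2 ≤ m := by exact_mod_cast he
      have hmm : m * m ≤ N := by exact_mod_cast hee
      exact h m hm2 (Nat.le_sqrt.mpr hmm) (by exact_mod_cast hdvd)
    · intro h
      refine ⟨h2, fun m hm2 hms hdvd => ?_⟩
      refine h m (by exact_mod_cast hm2) ?_ (by exact_mod_cast hdvd)
      exact_mod_cast Nat.le_sqrt.mp hms
  by_cases hp : Nat.Prime N
  · simp only [hp, decide_true]
    exact hiff.mpr (hprime.mp hp)
  · simp only [hp, decide_false]
    cases hb : isPrimeAux (N : Int) (N + 1) 2
    · rfl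
    · exact absurd (hprime.mpr (hiff.mp hb)) hp

-- digit characters
theorem pv_digitChar_eq_one (r : Nat) (hr : r < 10) :
    (Nat.digitChar r = '1') ↔ (r = 1) := by
  interval_cases r <;> simp [Nat.digitChar]

-- B's digit loop computes membership of 1 in the decimal digits
theorem pv_hasOneAux_eq : ∀ (fuel : Nat) (n : Nat), n < fuel →
    hasOneAux fuel (n : Int) = decide (1 ∈ Nat.digits 10 n) := by
  intro fuel
  induction fuel with
  | zero => intro n hn; omega
  | succ fuel ih =>
    intro n hn
    simp only [hasOneAux]
    by_cases h0 : 0 < n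
    · rw [if_pos (by exact_mod_cast h0 : (0 : Int) < (n : Int))]
      have hmodcast : PySem.Int.mod (n : Int) 10 = ((n % 10 : Nat) : Int) := by
        exact_mod_cast PySem.Int.mod_natCast n 10
      have hdivcast : PySem.Int.floordiv (n : Int) 10 = ((n / 10 : Nat) : Int) := by
        exact_mod_cast PySem.Int.floordiv_natCast n 10
      rw [hmodcast, hdivcast, Nat.digits_def' (by norm_num : (1 : Nat) < 10) h0]
      by_cases h : n % 10 = 1
      · have hb : (((n % 10 : Nat) : Int) == 1) = true := by simp [h]
        rw [hb]
        simp [h]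
      · have hb : (((n % 10 : Nat) : Int) == 1) = false := by
          simp only [beq_eq_false_iff_ne, ne_eq]
          exact_mod_cast h
        rw [hb, if_neg (by simp), ih (n / 10) (by omega)]
        have hne1 : ¬ ((1 : Nat) = n % 10) := fun hx => h hx.symm
        simp [List.mem_cons, hne1]
    · have hz : n = 0 := by omega
      subst hz
      rw [if_neg (by norm_num)]
      simp

theorem pv_hasOne_eq (n : Nat) : hasOne (n : Int) = decide (1 ∈ Nat.digits 10 n) := by
  unfold hasOne
  have ht : ((n : Int)).toNat = n := by omega
  rw [ht]
  exact pv_hasOneAux_eq (n + 1) n (by omega)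

-- membership of '1' in the digit string vs membership of 1 in the digits
theorem pv_toDigitsCore_mem (f : Nat) :
    ∀ (n : Nat) (l : List Char), 1 ≤ n → n < f →
      ('1' ∈ Nat.toDigitsCore 10 f n l ↔ ('1' ∈ l ∨ 1 ∈ Nat.digits 10 n)) := by
  induction f with
  | zero => intro n l h1 h2; omega
  | succ f ih =>
    intro n l h1 h2
    rw [Nat.digits_def' (by norm_num : (1 : Nat) < 10) (by omega : 0 < n)]
    have hr : n % 10 < 10 := Nat.mod_lt _ (by norm_num)
    rw [Nat.toDigitsCore]
    by_cases hz : n / 10 = 0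
    · rw [if_pos hz, hz]
      simp only [List.mem_cons, Nat.digits_zero, List.not_mem_nil]
      by_cases h : n % 10 = 1
      · simp [h, Nat.digitChar]
      · have hne : ('1' : Char) ≠ Nat.digitChar (n % 10) :=
          fun hc => h ((pv_digitChar_eq_one _ hr).mp hc.symm)
        have hne1 : ¬ ((1 : Nat) = n % 10) := fun hx => h hx.symm
        simp [hne, hne1]
    · rw [if_neg hz]
      rw [ih (n / 10) _ (by omega) (by omega)]
      simp only [List.mem_cons]
      by_cases h : n % 10 = 1
      · simp [h, Nat.digitChar]
      · have hne : ('1' : Char) ≠ Nat.digitChar (n % 10) :=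
          fun hc => h ((pv_digitChar_eq_one _ hr).mp hc.symm)
        have hne1 : ¬ ((1 : Nat) = n % 10) := fun hx => h hx.symm
        tauto

theorem pv_identificarUnos_eq (N : Nat) (h1 : 1 ≤ N) :
    identificarUnos (N : Int) = hasOne (N : Int) := by
  unfold identificarUnos
  show PySem.Str.isIn "1" (PySem.Int.toStr (N : Int)) = hasOne (N : Int)
  have hchars : (PySem.Int.toStr (N : Int)).toList = Nat.toDigits 10 N := by
    rw [PySem.Int.toList_toStr]
    simp [PySem.Int.toChars]
  have hmem : PySem.Str.isIn "1" (PySem.Int.toStr (N : Int)) = true ↔ '1' ∈ Nat.toDigits 10 N := by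
    rw [PySem.Str.isIn_iff_infix, hchars]
    have h1l : ("1" : String).toList = ['1'] := rfl
    rw [h1l]
    constructor
    · intro h; exact List.singleton_sublist.mp h.sublist
    · intro h
      obtain ⟨s, t, heq⟩ := List.append_of_mem h
      rw [heq]
      exact ⟨s, t, by simp⟩
  have hTD : '1' ∈ Nat.toDigits 10 N ↔ 1 ∈ Nat.digits 10 N := by
    have heq : Nat.toDigits 10 N = Nat.toDigitsCore 10 (N + 1) N [] := rfl
    rw [heq, pv_toDigitsCore_mem (N + 1) N [] h1 (by omega)]
    simp
  by_cases hd : 1 ∈ Nat.digits 10 N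
  · have h1' : hasOne (N : Int) = true := by rw [pv_hasOne_eq]; simp [hd]
    rw [h1']
    exact hmem.mpr (hTD.mpr hd)
  · have h1' : hasOne (N : Int) = false := by rw [pv_hasOne_eq]; simp [hd]
    rw [h1']
    cases hs : PySem.Str.isIn "1" (PySem.Int.toStr (N : Int))
    · rfl
    · exact absurd (hTD.mp (hmem.mp hs)) hd

-- ===== VERDICT (by name: the statement is the Claim_ definition above) =====
theorem sumaPrimos_spec : Claim_equal_sumaPrimos := by
  intro n _
  unfold Spec_sumaPrimos sumaPrimos sumaPrimos_alt
  apply PySem.List.foldl_congr_mem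
  intro acc i hi
  rw [PySem.List.mem_pyRange_one] at hi
  obtain ⟨h2, _⟩ := hi
  have hN : i = ((i.toNat : Nat) : Int) := by omega
  have h2' : 2 ≤ i.toNat := by omega
  rw [hN, pv_primos_eq i.toNat h2', pv_isPrime_eq i.toNat h2',
    pv_identificarUnos_eq i.toNat (by omega)]
  cases hP : decide (Nat.Prime i.toNat) <;> cases hO : hasOne ((i.toNat : Nat) : Int) <;> simp
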